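-- pv_equiv track=rewrite | github.com/RAZOR233/KORGYM | game_lib/4-SudoKu/game_lib.py | remove_numbers_randomly
-- ===== SOURCE A (Python) =====
-- import math
--
-- size = 9
--
-- sqrt_size = int(math.sqrt(size))
--
-- def remove_numbers_randomly(current_board, cutoff):
--     """
--     通过随机方式移除数字
--     """
--     removed_items = 0
--     for i in range(size):
--         for j in range(size):
--             if removed_items >= cutoff:
--                 return current_board  # 修复：返回当前棋盘而不是直接返回None
--
--             if current_board[i][j] == 0:
--                 continue
--
--             # 暂时保存当前数字
--             temp = current_board[i][j]
--             current_board[i][j] = 0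
--
--             # 创建棋盘副本进行测试
--             test_board = [row[:] for row in current_board]
--
--             # 检查是否有唯一解
--             if solve_board(test_board):
--                 removed_items += 1
--             else:
--                 # 如果没有唯一解，恢复原来的数字
--                 current_board[i][j] = temp
--     return current_board
--
-- def solve_board( board):
--     """
--     使用回溯法解数独
--     """
--     empty = find_empty(board)
--     if not empty:
--         return True
--
--     row, col = empty
--
--     for num in range(1, size + 1):
--         if is_safe(board, row, col, num):
--             board[row][col] = num
--
--             if solve_board(board):
--                 return True
--
--             board[row][col] = 0
--
--     return False
--
-- def find_empty(board):
--     """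
--     找到一个空位置
--     """
--     for i in range(size):
--         for j in range(size):
--             if board[i][j] == 0:
--                 return (i, j)
--     return None
--
-- def is_safe( board, row, col, num):
--     """
--     检查在指定位置放置数字是否安全
--     """
--     # 检查行
--     if num in board[row]:
--         return False
--
--     # 检查列
--     if num in [board[i][col] for i in range(size)]:
--         return False
--
--     # 检查3x3宫格
--     start_row = (row // sqrt_size) * sqrt_size
--     start_col = (col // sqrt_size) * sqrt_size
--
--     for i in range(start_row, start_row + sqrt_size):
--         for j in range(start_col, start_col + sqrt_size):
--             if board[i][j] == num:
--                 return False
--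
--     return True
-- ===== SOURCE B (Python) =====
-- # B: same outer scan (mutates current_board in place, like A), but solvability is
-- # decided by an MRV constraint search: candidate digits are precomputed per empty
-- # cell and the search always branches on the cell with the fewest candidates.
--
-- def _candidates(board, i, j):
--     r0, c0 = i - i % 3, j - j % 3
--     used = list(board[i])
--     used += [board[k][j] for k in range(9)]
--     for r in range(r0, r0 + 3):
--         used += [board[r][c] for c in range(c0, c0 + 3)]
--     return [d for d in range(1, 10) if d not in used]
--
-- def _search(board):
--     best = None
--     for i in range(9):
--         for j in range(9):
--             if board[i][j] == 0:
--                 cand = _candidates(board, i, j)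
--                 if best is None or len(cand) < len(best[2]):
--                     best = (i, j, cand)
--     if best is None:
--         return True
--     i, j, cand = best
--     for d in cand:
--         board[i][j] = d
--         if _search(board):
--             return True
--     board[i][j] = 0
--     return False
--
-- def _solvable(board):
--     return _search([row[:] for row in board])
--
-- def remove_numbers_randomly(current_board, cutoff):
--     removed = 0
--     for i, j in [(i, j) for i in range(9) for j in range(9)]:
--         if removed >= cutoff:
--             return current_board
--         v = current_board[i][j]
--         if v == 0:
--             continue
--         current_board[i][j] = 0
--         if _solvable(current_board):
--             removed += 1
--         else:
--             current_board[i][j] = v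
--     return current_board
-- ===== Notes on version B (the rewrite author's own statement) =====
-- stated objective: alternative
-- what changed: The recursive first-empty/is_safe backtracking solver is replaced by an MRV constraint search that precomputes the candidate-digit list of every empty cell and always branches on the cell with the fewest candidates (pruning dead ends immediately), and the outer nested i/j scan becomes one pass over a flat coordinate list; solvability is decided identically, so the returned board is the same.
import Mathlib
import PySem

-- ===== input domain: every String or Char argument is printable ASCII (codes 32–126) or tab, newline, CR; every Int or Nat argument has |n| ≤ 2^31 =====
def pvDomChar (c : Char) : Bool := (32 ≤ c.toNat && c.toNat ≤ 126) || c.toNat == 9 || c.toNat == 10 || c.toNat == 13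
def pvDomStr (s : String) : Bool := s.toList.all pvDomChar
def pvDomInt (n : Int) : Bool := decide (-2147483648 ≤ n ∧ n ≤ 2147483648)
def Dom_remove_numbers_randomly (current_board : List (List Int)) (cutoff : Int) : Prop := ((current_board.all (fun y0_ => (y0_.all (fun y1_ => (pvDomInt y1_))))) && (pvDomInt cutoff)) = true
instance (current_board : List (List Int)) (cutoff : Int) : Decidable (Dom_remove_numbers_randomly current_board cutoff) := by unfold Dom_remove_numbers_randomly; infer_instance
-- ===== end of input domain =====

-- B replaces A's first-empty/is_safe backtracker by an MRV candidate-list search (same in-place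
-- mutation of current_board as A; the theorems below are about the returned board value).

-- board[i][j] (total form; every claimed access is in range under Pre_)
def cellAt (b : List (List Int)) (i j : Nat) : Int := (b.getD i []).getD j 0

-- board[i][j] = v
def putAt (b : List (List Int)) (i j : Nat) (v : Int) : List (List Int) :=
  b.set i ((b.getD i []).set j v)

-- ===== PORT A =====
-- find_empty: first (i, j) in row-major order with board[i][j] == 0
def find_empty (b : List (List Int)) : Option (Nat × Nat) :=
  (List.range 9).findSome? (fun i =>
    (List.range 9).findSome? (fun j => if cellAt b i j = 0 then some (i, j) else none))

-- is_safe: row membership, column scan, 3x3 box scan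
def is_safe (b : List (List Int)) (row col : Nat) (num : Int) : Bool :=
  if (b.getD row []).contains num then false
  else if ((List.range 9).map (fun i => cellAt b i col)).contains num then false
  else if (List.range 3).any (fun di => (List.range 3).any (fun dj =>
            cellAt b (row / 3 * 3 + di) (col / 3 * 3 + dj) == num)) then false
  else true

-- solve_board: recursive backtracking; fuel 81 only makes the recursion total
-- (at most 81 empty cells, each recursive call fills one)
def solveAAux : Nat → List (List Int) → Bool
  | fuel, b =>
    match find_empty b with
    | none => true
    | some (r, c) =>
      match fuel with
      | 0 => false
      | fuel' + 1 =>
        (PySem.List.pyRange 1 10 1).any (fun num =>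
          is_safe b r c num && solveAAux fuel' (putAt b r c num))
termination_by fuel _ => fuel

def solve_board (b : List (List Int)) : Bool := solveAAux 81 b

-- outer loop of A: nested for i / for j with the early cutoff return
def goA (cutoff : Int) (i j : Nat) (b : List (List Int)) (removed : Int) : List (List Int) :=
  if 9 ≤ i then b
  else if 9 ≤ j then goA cutoff (i + 1) 0 b removed
  else if cutoff ≤ removed then b
  else if cellAt b i j = 0 then goA cutoff i (j + 1) b removed
  else
    let b' := putAt b i j 0
    if solve_board b' then goA cutoff i (j + 1) b' (removed + 1)
    else goA cutoff i (j + 1) b removed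
termination_by (9 - i) * 10 + (9 - j)
decreasing_by all_goals omega

def remove_numbers_randomly (current_board : List (List Int)) (cutoff : Int) : List (List Int) :=
  goA cutoff 0 0 current_board 0

-- ===== PORT B =====
-- _candidates: all digits 1..9 not used in the row, the column or the 3x3 box
def candidatesB (b : List (List Int)) (i j : Nat) : List Int :=
  let r0 := i - i % 3
  let c0 := j - j % 3
  let used := (b.getD i []) ++ (List.range 9).map (fun k => cellAt b k j)
  let used := (List.range 3).foldl
    (fun acc dr => acc ++ (List.range 3).map (fun dc => cellAt b (r0 + dr) (c0 + dc))) used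
  (PySem.List.pyRange 1 10 1).filter (fun d => !(used.contains d))

-- the MRV scan: best = empty cell with the fewest candidates (first one on ties)
def pickBest (b : List (List Int)) : Option (Nat × Nat × List Int) :=
  (List.range 9).foldl (fun best i =>
    (List.range 9).foldl (fun best j =>
      if cellAt b i j = 0 then
        let cand := candidatesB b i j
        match best with
        | none => some (i, j, cand)
        | some (_, _, c) => if cand.length < c.length then some (i, j, cand) else best
      else best) best) none

-- _search: branch on the MRV cell over its candidate list (fuel 81 as above)
def solveBAux : Nat → List (List Int) → Bool
  | fuel, b =>
    match pickBest b with
    | none => true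
    | some (i, j, cand) =>
      match fuel with
      | 0 => false
      | fuel' + 1 => cand.any (fun d => solveBAux fuel' (putAt b i j d))
termination_by fuel _ => fuel

-- _solvable (the Python copies the board first; the copy is the identity on the value)
def solvableB (b : List (List Int)) : Bool := solveBAux 81 b

-- the precomputed coordinate list [(i, j) for i in range(9) for j in range(9)]
def allPositions : List (Nat × Nat) :=
  (List.range 9).flatMap (fun i => (List.range 9).map (fun j => (i, j)))

-- outer loop of B: one pass over the flat coordinate list
def goB (cutoff : Int) (ps : List (Nat × Nat)) (b : List (List Int)) (removed : Int) :
    List (List Int) :=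
  match ps with
  | [] => b
  | (i, j) :: rest =>
    if cutoff ≤ removed then b
    else if cellAt b i j = 0 then goB cutoff rest b removed
    else
      let b' := putAt b i j 0
      if solvableB b' then goB cutoff rest b' (removed + 1)
      else goB cutoff rest b removed

def remove_numbers_randomly_alt (current_board : List (List Int)) (cutoff : Int) :
    List (List Int) :=
  goB cutoff allPositions current_board 0

-- ===== PRECONDITION & SPEC =====
-- the board shape on which every index access of A is in range
def Shaped (b : List (List Int)) : Prop :=
  9 ≤ b.length ∧ ∀ i, i < 9 → 9 ≤ (b.getD i []).length

-- A raises IndexError on boards without 9 rows of ≥ 9 cells, except when cutoff ≤ 0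
-- (then it returns the board untouched before any access); Pre_ is exactly A's return domain.
def Pre_remove_numbers_randomly (current_board : List (List Int)) (cutoff : Int) : Prop :=
  cutoff ≤ 0 ∨ Shaped current_board

instance (current_board : List (List Int)) (cutoff : Int) :
    Decidable (Pre_remove_numbers_randomly current_board cutoff) := by
  unfold Pre_remove_numbers_randomly Shaped; infer_instance

def pvWitness_remove_numbers_randomly : List (List Int) × Int :=
  ([[5,3,4,6,7,8,9,1,2],[6,7,2,1,9,5,3,4,8],[1,9,8,3,4,2,5,6,7],
    [8,5,9,7,6,1,4,2,3],[4,2,6,8,5,3,7,9,1],[7,1,3,9,2,4,8,5,6],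
    [9,6,1,5,3,7,2,8,4],[2,8,7,4,1,9,6,3,5],[3,4,5,2,8,6,1,7,9]], 2)

def Spec_remove_numbers_randomly (current_board : List (List Int)) (cutoff : Int) (out : List (List Int)) : Prop := out = remove_numbers_randomly_alt current_board cutoff
instance (current_board : List (List Int)) (cutoff : Int) (out : List (List Int)) : Decidable (Spec_remove_numbers_randomly current_board cutoff out) := by unfold Spec_remove_numbers_randomly; infer_instance

-- ===== CLAIM (what is proved, stated in full; the proofs are below) =====
def Claim_equal_remove_numbers_randomly : Prop := ∀ (current_board : List (List Int)) (cutoff : Int), Dom_remove_numbers_randomly current_board cutoff → Pre_remove_numbers_randomly current_board cutoff → Spec_remove_numbers_randomly current_board cutoff (remove_numbers_randomly current_board cutoff)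

-- ===== LEMMAS AND PROOFS =====

-- ---- basic board lemmas ----
theorem length_putAt (b : List (List Int)) (i j : Nat) (v : Int) :
    (putAt b i j v).length = b.length := by
  simp [putAt]

theorem rowlen_putAt (b : List (List Int)) (i j : Nat) (v : Int) (i' : Nat) :
    ((putAt b i j v).getD i' []).length = (b.getD i' []).length := by
  simp only [putAt, List.getD, List.getElem?_set]
  split
  · rename_i h
    subst h
    split
    · simp
    · rename_i h2
      rw [List.getElem?_eq_none (Nat.le_of_not_lt h2)]
  · rfl

theorem cellAt_putAt_same (b : List (List Int)) (i j : Nat) (v : Int)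
    (hi : i < b.length) (hj : j < (b.getD i []).length) :
    cellAt (putAt b i j v) i j = v := by
  have hj' : j < (b[i]?.getD []).length := by simpa [List.getD] using hj
  have h1 : (putAt b i j v)[i]? = some ((b[i]?.getD []).set j v) := by
    rw [putAt, List.getElem?_set]
    simp [hi, List.getD]
  have h2 : ((b[i]?.getD []).set j v)[j]? = some v := by
    rw [List.getElem?_set]
    simp [hj']
  simp [cellAt, List.getD, h1, h2]

theorem cellAt_putAt_ne (b : List (List Int)) (i j : Nat) (v : Int) (i' j' : Nat)
    (h : (i', j') ≠ (i, j)) :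
    cellAt (putAt b i j v) i' j' = cellAt b i' j' := by
  by_cases hii : i = i'
  · subst hii
    have hj : j ≠ j' := by intro hj; exact h (by rw [hj])
    by_cases hlen : i < b.length
    · have h1 : (putAt b i j v)[i]? = some ((b[i]?.getD []).set j v) := by
        rw [putAt, List.getElem?_set]
        simp [hlen, List.getD]
      have h2 : ((b[i]?.getD []).set j v)[j']? = (b[i]?.getD [])[j']? := by
        rw [List.getElem?_set]
        simp [hj]
      simp [cellAt, List.getD, h1, h2]
    · have h1 : putAt b i j v = b := by
        rw [putAt, List.set_eq_of_length_le (Nat.le_of_not_lt hlen)]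
      rw [h1]
  · have h1 : (putAt b i j v)[i']? = b[i']? := by
      rw [putAt, List.getElem?_set]
      simp [hii]
    simp [cellAt, List.getD, h1]

theorem Shaped_putAt (b : List (List Int)) (i j : Nat) (v : Int) (h : Shaped b) :
    Shaped (putAt b i j v) := by
  constructor
  · rw [length_putAt]; exact h.1
  · intro k hk; rw [rowlen_putAt]; exact h.2 k hk

-- ---- counting empty cells (the solver's variant) ----
def zeros (b : List (List Int)) : Nat :=
  allPositions.countP (fun p => cellAt b p.1 p.2 == 0)

theorem zeros_le (b : List (List Int)) : zeros b ≤ 81 := by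
  have h := List.countP_le_length (l := allPositions) (p := fun p => cellAt b p.1 p.2 == 0)
  have hlen : allPositions.length = 81 := by decide
  rw [hlen] at h
  exact h

theorem mem_allPositions (p : Nat × Nat) : p ∈ allPositions ↔ p.1 < 9 ∧ p.2 < 9 := by
  obtain ⟨a, c⟩ := p
  simp only [allPositions, List.mem_flatMap, List.mem_map, List.mem_range, Prod.mk.injEq]
  constructor
  · rintro ⟨i, hi, j, hj, rfl, rfl⟩
    exact ⟨hi, hj⟩
  · rintro ⟨ha, hc⟩
    exact ⟨a, ha, c, hc, rfl, rfl⟩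

theorem countP_lt_of_flip {α : Type} [DecidableEq α] (l : List α) (f g : α → Bool) (p : α)
    (hp : p ∈ l) (hf : f p = false) (hg : g p = true)
    (hagree : ∀ q ∈ l, q ≠ p → f q = g q) (hnd : l.Nodup) :
    l.countP f < l.countP g := by
  induction l with
  | nil => cases hp
  | cons a l ih =>
    rw [List.countP_cons, List.countP_cons]
    by_cases hpa : p = a
    · have hle : l.countP f ≤ l.countP g := by
        apply Nat.le_of_eq
        apply List.countP_congr
        intro q hq
        have hqa : q ≠ p := fun h => (List.nodup_cons.1 hnd).1 (hpa ▸ h ▸ hq)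
        rw [hagree q (List.mem_cons_of_mem _ hq) hqa]
      rw [← hpa, hf, hg]
      simp only [Bool.false_eq_true, if_false, if_true]
      omega
    · have hpl : p ∈ l := (List.mem_cons.1 hp).resolve_left hpa
      have hap : a ≠ p := fun h => hpa h.symm
      rw [hagree a List.mem_cons_self hap]
      have := ih hpl (fun q hq hqp => hagree q (List.mem_cons_of_mem _ hq) hqp)
        (List.nodup_cons.1 hnd).2
      omega

theorem zeros_putAt_lt (b : List (List Int)) (i j : Nat) (v : Int)
    (hi : i < 9) (hj : j < 9) (h0 : cellAt b i j = 0) (hv : v ≠ 0) (hsh : Shaped b) :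
    zeros (putAt b i j v) < zeros b := by
  apply countP_lt_of_flip (p := (i, j))
  · exact (mem_allPositions _).2 ⟨hi, hj⟩
  · have hc := cellAt_putAt_same b i j v (by have := hsh.1; omega)
      (by have := hsh.2 i hi; omega)
    simp only [hc]
    simpa using hv
  · simpa using h0
  · intro q _ hq
    simp only [cellAt_putAt_ne b i j v q.1 q.2 (by simpa using hq)]
  · decide

-- ---- the order-independent notion of a solved completion ----
def Sol (b s : List (List Int)) : Prop :=
  s.length = b.length ∧
  (∀ i, (s.getD i []).length = (b.getD i []).length) ∧
  (∀ i j, ¬(i < 9 ∧ j < 9 ∧ cellAt b i j = 0) → cellAt s i j = cellAt b i j) ∧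
  (∀ i j, i < 9 → j < 9 → cellAt b i j = 0 →
     1 ≤ cellAt s i j ∧ cellAt s i j ≤ 9 ∧
     (∀ j', j' < (s.getD i []).length → j' ≠ j → cellAt s i j' ≠ cellAt s i j) ∧
     (∀ i', i' < 9 → i' ≠ i → cellAt s i' j ≠ cellAt s i j) ∧
     (∀ di dj, di < 3 → dj < 3 → (i / 3 * 3 + di, j / 3 * 3 + dj) ≠ (i, j) →
        cellAt s (i / 3 * 3 + di) (j / 3 * 3 + dj) ≠ cellAt s i j))

def Solvable (b : List (List Int)) : Prop := ∃ s, Sol b s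

def SafeP (b : List (List Int)) (r c : Nat) (v : Int) : Prop :=
  (¬ v ∈ b.getD r []) ∧
  (∀ i', i' < 9 → cellAt b i' c ≠ v) ∧
  (∀ di dj, di < 3 → dj < 3 → cellAt b (r / 3 * 3 + di) (c / 3 * 3 + dj) ≠ v)

theorem Solvable_of_no_empty (b : List (List Int))
    (h : ∀ i j, i < 9 → j < 9 → cellAt b i j ≠ 0) : Solvable b := by
  refine ⟨b, rfl, fun _ => rfl, fun _ _ _ => rfl, fun i j hi hj h0 => absurd h0 (h i j hi hj)⟩

-- the central exchange lemma: filling ANY empty cell with a safe digit preserves solvability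
theorem step_iff (b : List (List Int)) (r c : Nat) (hsh : Shaped b)
    (hr : r < 9) (hc : c < 9) (h0 : cellAt b r c = 0) :
    Solvable b ↔ ∃ v : Int, 1 ≤ v ∧ v ≤ 9 ∧ SafeP b r c v ∧ Solvable (putAt b r c v) := by
  have hbl : r < b.length := by have := hsh.1; omega
  have hrl : c < (b.getD r []).length := by have := hsh.2 r hr; omega
  have hcellmem : ∀ (i j' : Nat), j' < (b.getD i []).length → cellAt b i j' ∈ b.getD i [] := by
    intro i j' hj'
    rw [cellAt, List.getD_eq_getElem _ _ hj']
    exact List.getElem_mem hj'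
  constructor
  · rintro ⟨s, hslen, hsrow, hag, hemp⟩
    obtain ⟨hv1, hv9, hrowOK, hcolOK, hboxOK⟩ := hemp r c hr hc h0
    refine ⟨cellAt s r c, hv1, hv9, ⟨?_, ?_, ?_⟩, ⟨s, ?_, ?_, ?_, ?_⟩⟩
    · -- the chosen value does not occur in row r of b
      intro hmemv
      obtain ⟨j', hj', hjeq⟩ := List.mem_iff_getElem.1 hmemv
      have hcell : cellAt b r j' = cellAt s r c := by
        rw [cellAt, List.getD_eq_getElem _ _ hj']; exact hjeq
      by_cases hje : r < 9 ∧ j' < 9 ∧ cellAt b r j' = 0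
      · have := hje.2.2; omega
      · have hagj := hag r j' hje
        have hne : j' ≠ c := by
          intro hjc
          exact hje ⟨hr, by omega, by rw [hjc]; exact h0⟩
        have hlt : j' < (s.getD r []).length := by rw [hsrow r]; exact hj'
        exact hrowOK j' hlt hne (by rw [hagj]; exact hcell)
    · -- nor in column c
      intro i' hi' heq
      by_cases hie : i' = r
      · rw [hie, h0] at heq; omega
      · by_cases hje : i' < 9 ∧ c < 9 ∧ cellAt b i' c = 0
        · have := hje.2.2; omega
        · have hagj := hag i' c hje
          exact hcolOK i' hi' hie (by rw [hagj]; exact heq)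
    · -- nor in the box
      intro di dj hdi hdj heq
      by_cases hpe : (r / 3 * 3 + di, c / 3 * 3 + dj) = (r, c)
      · rw [Prod.mk.injEq] at hpe
        have hz : cellAt b (r / 3 * 3 + di) (c / 3 * 3 + dj) = 0 := by
          rw [hpe.1, hpe.2]; exact h0
        omega
      · by_cases hje : r / 3 * 3 + di < 9 ∧ c / 3 * 3 + dj < 9 ∧
            cellAt b (r / 3 * 3 + di) (c / 3 * 3 + dj) = 0
        · have := hje.2.2; omega
        · have hagj := hag _ _ hje
          exact hboxOK di dj hdi hdj hpe (by rw [hagj]; exact heq)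
    · rw [length_putAt]; exact hslen
    · intro i; rw [rowlen_putAt]; exact hsrow i
    · -- s agrees with the filled board off the empties of the filled board
      intro i j hnot
      by_cases hp : (i, j) = (r, c)
      · rw [Prod.mk.injEq] at hp
        obtain ⟨rfl, rfl⟩ := hp
        rw [cellAt_putAt_same b i j _ hbl hrl]
      · rw [cellAt_putAt_ne b r c _ i j hp]
        apply hag
        intro hcon
        exact hnot ⟨hcon.1, hcon.2.1, by
          rw [cellAt_putAt_ne b r c _ i j hp]; exact hcon.2.2⟩
    · -- constraints at the remaining empties are unchanged
      intro i j hi9 hj9 h0'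
      have hp : (i, j) ≠ (r, c) := by
        intro he
        rw [Prod.mk.injEq] at he
        rw [he.1, he.2, cellAt_putAt_same b r c _ hbl hrl] at h0'
        omega
      rw [cellAt_putAt_ne b r c _ i j hp] at h0'
      exact hemp i j hi9 hj9 h0'
  · rintro ⟨v, hv1, hv9, ⟨hsrowS, hscolS, hsboxS⟩, s, hslen, hsrow, hag, hemp⟩
    have hb'rc : cellAt (putAt b r c v) r c = v := cellAt_putAt_same b r c v hbl hrl
    have hsrc : cellAt s r c = v := by
      have h := hag r c (by intro hcon; rw [hb'rc] at hcon; omega)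
      rw [h, hb'rc]
    refine ⟨s, ?_, ?_, ?_, ?_⟩
    · rw [hslen, length_putAt]
    · intro i; rw [hsrow i, rowlen_putAt]
    · intro i j hnot
      have hp : (i, j) ≠ (r, c) := by
        intro he
        rw [Prod.mk.injEq] at he
        exact hnot ⟨he.1 ▸ hr, he.2 ▸ hc, by rw [he.1, he.2]; exact h0⟩
      rw [← cellAt_putAt_ne b r c v i j hp]
      apply hag
      intro hcon
      rw [cellAt_putAt_ne b r c v i j hp] at hcon
      exact hnot ⟨hcon.1, hcon.2.1, hcon.2.2⟩
    · intro i j hi9 hj9 h0b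
      by_cases hp : (i, j) = (r, c)
      · rw [Prod.mk.injEq] at hp
        obtain ⟨rfl, rfl⟩ := hp
        refine ⟨by rw [hsrc]; exact hv1, by rw [hsrc]; exact hv9, ?_, ?_, ?_⟩
        · -- row constraint at the newly filled cell
          intro j' hj'len hne
          rw [hsrc]
          by_cases hje : i < 9 ∧ j' < 9 ∧ cellAt (putAt b i j v) i j' = 0
          · have h2 := (hemp i j' hje.1 hje.2.1 hje.2.2).2.2.1
            have hclen : j < (s.getD i []).length := by
              have h := hsrow i; rw [rowlen_putAt] at h; omega
            have h3 := h2 j hclen (fun hcj => hne hcj.symm)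
            rw [hsrc] at h3
            exact fun he => h3 (by rw [he])
          · have hagj := hag i j' hje
            have hb'j : cellAt (putAt b i j v) i j' = cellAt b i j' := by
              apply cellAt_putAt_ne
              intro he; rw [Prod.mk.injEq] at he; exact hne he.2
            rw [hagj, hb'j]
            intro he
            apply hsrowS
            have hj'b : j' < (b.getD i []).length := by
              have h := hsrow i; rw [rowlen_putAt] at h; omega
            rw [← he]
            exact hcellmem i j' hj'b
        · -- column constraint at the newly filled cell
          intro i' hi'9 hne
          rw [hsrc]
          by_cases hje : i' < 9 ∧ j < 9 ∧ cellAt (putAt b i j v) i' j = 0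
          · have h2 := (hemp i' j hje.1 hje.2.1 hje.2.2).2.2.2.1
            have h3 := h2 i hi9 (fun hri => hne hri.symm)
            rw [hsrc] at h3
            exact fun he => h3 (by rw [he])
          · have hagj := hag i' j hje
            have hb'j : cellAt (putAt b i j v) i' j = cellAt b i' j := by
              apply cellAt_putAt_ne
              intro he; rw [Prod.mk.injEq] at he; exact hne he.1
            rw [hagj, hb'j]
            exact hscolS i' hi'9
        · -- box constraint at the newly filled cell
          intro di dj hdi hdj hnep
          rw [hsrc]
          by_cases hje : i / 3 * 3 + di < 9 ∧ j / 3 * 3 + dj < 9 ∧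
              cellAt (putAt b i j v) (i / 3 * 3 + di) (j / 3 * 3 + dj) = 0
          · have h2 := (hemp _ _ hje.1 hje.2.1 hje.2.2).2.2.2.2
            have h3 := h2 (i - i / 3 * 3) (j - j / 3 * 3) (by omega) (by omega) (by
              intro he
              apply hnep
              rw [Prod.mk.injEq] at he ⊢
              obtain ⟨he1, he2⟩ := he
              exact ⟨by omega, by omega⟩)
            have hidx1 : (i / 3 * 3 + di) / 3 * 3 + (i - i / 3 * 3) = i := by omega
            have hidx2 : (j / 3 * 3 + dj) / 3 * 3 + (j - j / 3 * 3) = j := by omega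
            rw [hidx1, hidx2, hsrc] at h3
            exact fun he => h3 (by rw [he])
          · have hagj := hag _ _ hje
            have hb'j : cellAt (putAt b i j v) (i / 3 * 3 + di) (j / 3 * 3 + dj) =
                cellAt b (i / 3 * 3 + di) (j / 3 * 3 + dj) := cellAt_putAt_ne b i j v _ _ hnep
            rw [hagj, hb'j]
            exact hsboxS di dj hdi hdj
      · have hz' : cellAt (putAt b r c v) i j = 0 := by
          rw [cellAt_putAt_ne b r c v i j hp]; exact h0b
        exact hemp i j hi9 hj9 hz'

-- ---- characterisations of the two ports' primitives ----
theorem find_empty_none (b : List (List Int)) :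
    find_empty b = none ↔ ∀ i j, i < 9 → j < 9 → cellAt b i j ≠ 0 := by
  simp only [find_empty, List.findSome?_eq_none_iff, List.mem_range]
  constructor
  · intro h i j hi hj h0
    have := h i hi j hj
    rw [if_pos h0] at this
    cases this
  · intro h i hi j hj
    rw [if_neg (h i j hi hj)]

theorem find_empty_some (b : List (List Int)) (r c : Nat) (h : find_empty b = some (r, c)) :
    r < 9 ∧ c < 9 ∧ cellAt b r c = 0 := by
  obtain ⟨i, hi, h2⟩ := List.exists_of_findSome?_eq_some h
  obtain ⟨j, hj, h3⟩ := List.exists_of_findSome?_eq_some h2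
  rw [List.mem_range] at hi hj
  by_cases h0 : cellAt b i j = 0
  · rw [if_pos h0] at h3
    obtain ⟨rfl, rfl⟩ : i = r ∧ j = c := by
      injection h3 with h3; exact ⟨congrArg Prod.fst h3, congrArg Prod.snd h3⟩
    exact ⟨hi, hj, h0⟩
  · rw [if_neg h0] at h3
    cases h3

theorem is_safe_iff (b : List (List Int)) (r c : Nat) (v : Int) :
    is_safe b r c v = true ↔ SafeP b r c v := by
  simp only [is_safe]
  split_ifs with h1 h2 h3
  · simp only [false_iff]
    intro hs
    exact hs.1 (List.contains_iff_mem.1 h1)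
  · simp only [false_iff]
    intro hs
    obtain ⟨x, hx, hxe⟩ := List.mem_map.1 (List.contains_iff_mem.1 h2)
    exact hs.2.1 x (List.mem_range.1 hx) hxe
  · simp only [false_iff]
    intro hs
    obtain ⟨di, hdi, h4⟩ := List.any_eq_true.1 h3
    obtain ⟨dj, hdj, h5⟩ := List.any_eq_true.1 h4
    exact hs.2.2 di dj (List.mem_range.1 hdi) (List.mem_range.1 hdj) (beq_iff_eq.1 h5)
  · simp only [true_iff]
    refine ⟨fun hm => h1 (List.contains_iff_mem.2 hm), ?_, ?_⟩
    · intro i' hi' he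
      exact h2 (List.contains_iff_mem.2 (List.mem_map.2 ⟨i', List.mem_range.2 hi', he⟩))
    · intro di dj hdi hdj he
      exact h3 (List.any_eq_true.2 ⟨di, List.mem_range.2 hdi,
        List.any_eq_true.2 ⟨dj, List.mem_range.2 hdj, beq_iff_eq.2 he⟩⟩)

theorem foldl_append_map_range3 (b : List (List Int)) (r0 c0 : Nat) (init : List Int) :
    (List.range 3).foldl
      (fun acc dr => acc ++ (List.range 3).map (fun dc => cellAt b (r0 + dr) (c0 + dc))) init =
    init ++ (List.range 3).flatMap (fun dr => (List.range 3).map (fun dc => cellAt b (r0 + dr) (c0 + dc))) := by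
  simp [List.range_succ, List.flatMap_cons, List.flatMap_nil]

theorem mem_candidatesB (b : List (List Int)) (i j : Nat) (_hi : i < 9) (_hj : j < 9) (d : Int) :
    d ∈ candidatesB b i j ↔ 1 ≤ d ∧ d ≤ 9 ∧ SafeP b i j d := by
  have hr0 : i - i % 3 = i / 3 * 3 := by omega
  have hc0 : j - j % 3 = j / 3 * 3 := by omega
  simp only [candidatesB, hr0, hc0, foldl_append_map_range3]
  rw [List.mem_filter]
  rw [PySem.List.mem_pyRange_one]
  have hused : ∀ (u : List Int) (hu : (!u.contains d) = true), ¬ d ∈ u := by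
    intro u hu hmem
    rw [Bool.not_eq_true', ← Bool.not_eq_true] at hu
    exact hu (List.contains_iff_mem.2 hmem)
  constructor
  · rintro ⟨hmem, hnc⟩
    have hnu := hused _ hnc
    simp only [List.mem_append, List.mem_flatMap, List.mem_map, List.mem_range, not_or,
      not_exists, not_and] at hnu
    refine ⟨hmem.1, by omega, ?_, ?_, ?_⟩
    · exact hnu.1.1
    · intro i' hi' he
      exact hnu.1.2 i' hi' he
    · intro di dj hdi hdj he
      exact hnu.2 di hdi dj hdj he
  · rintro ⟨h1, h9, hrow, hcol, hbox⟩
    refine ⟨⟨h1, by omega⟩, ?_⟩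
    rw [Bool.not_eq_true', ← Bool.not_eq_true]
    intro hc
    rcases List.mem_append.1 (List.contains_iff_mem.1 hc) with hc1 | hc2
    · rcases List.mem_append.1 hc1 with hc3 | hc4
      · exact hrow hc3
      · obtain ⟨i', hi', he⟩ := List.mem_map.1 hc4
        exact hcol i' (List.mem_range.1 hi') he
    · obtain ⟨di, hdi, hin⟩ := List.mem_flatMap.1 hc2
      obtain ⟨dj, hdj, he⟩ := List.mem_map.1 hin
      exact hbox di dj (List.mem_range.1 hdi) (List.mem_range.1 hdj) he

def pbStep (b : List (List Int)) (best : Option (Nat × Nat × List Int)) (p : Nat × Nat) :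
    Option (Nat × Nat × List Int) :=
  if cellAt b p.1 p.2 = 0 then
    let cand := candidatesB b p.1 p.2
    match best with
    | none => some (p.1, p.2, cand)
    | some (_, _, c) => if cand.length < c.length then some (p.1, p.2, cand) else best
  else best

theorem foldl_foldl_eq_foldl_flatMap {α β γ : Type} (l : List α) (g : α → List β)
    (f : γ → β → γ) (init : γ) :
    l.foldl (fun acc a => (g a).foldl f acc) init = (l.flatMap g).foldl f init := by
  induction l generalizing init with
  | nil => rfl
  | cons a l ih => simp only [List.foldl_cons, List.flatMap_cons, List.foldl_append, ih]

theorem pickBest_eq (b : List (List Int)) :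
    pickBest b = allPositions.foldl (pbStep b) none := by
  rw [pickBest, allPositions, ← foldl_foldl_eq_foldl_flatMap]
  congr 1

def pbValid (b : List (List Int)) (t : Nat × Nat × List Int) : Prop :=
  t.1 < 9 ∧ t.2.1 < 9 ∧ cellAt b t.1 t.2.1 = 0 ∧ t.2.2 = candidatesB b t.1 t.2.1

theorem pbStep_eq_none (b : List (List Int)) (best : Option (Nat × Nat × List Int))
    (p : Nat × Nat) (h : pbStep b best p = none) :
    best = none ∧ cellAt b p.1 p.2 ≠ 0 := by
  by_cases h0 : cellAt b p.1 p.2 = 0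
  · exfalso
    cases best with
    | none => simp [pbStep, h0] at h
    | some t =>
      obtain ⟨a, c, cl⟩ := t
      simp only [pbStep, if_pos h0] at h
      split at h <;> cases h
  · rw [pbStep, if_neg h0] at h
    exact ⟨h, h0⟩

theorem pbStep_valid (b : List (List Int)) (best : Option (Nat × Nat × List Int))
    (p : Nat × Nat) (hp : p.1 < 9 ∧ p.2 < 9)
    (hb : best = none ∨ ∃ t, best = some t ∧ pbValid b t) :
    pbStep b best p = none ∨ ∃ t, pbStep b best p = some t ∧ pbValid b t := by
  by_cases h0 : cellAt b p.1 p.2 = 0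
  · right
    cases best with
    | none =>
      refine ⟨(p.1, p.2, candidatesB b p.1 p.2), ?_, hp.1, hp.2, h0, rfl⟩
      simp [pbStep, h0]
    | some t =>
      obtain ⟨a, c, cl⟩ := t
      rcases hb with hb | ⟨t', ht', hv⟩
      · cases hb
      · obtain rfl : (a, c, cl) = t' := by injection ht'
        simp only [pbStep, if_pos h0]
        split
        · exact ⟨(p.1, p.2, candidatesB b p.1 p.2), rfl, hp.1, hp.2, h0, rfl⟩
        · exact ⟨(a, c, cl), rfl, hv⟩
  · rw [pbStep, if_neg h0]
    exact hb

theorem pbFold_spec (b : List (List Int)) (l : List (Nat × Nat)) :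
    ∀ (best : Option (Nat × Nat × List Int)),
    (best = none ∨ ∃ t, best = some t ∧ pbValid b t) →
    (∀ p ∈ l, p.1 < 9 ∧ p.2 < 9) →
    ((l.foldl (pbStep b) best = none → best = none ∧ ∀ p ∈ l, cellAt b p.1 p.2 ≠ 0) ∧
     (∀ t, l.foldl (pbStep b) best = some t → pbValid b t)) := by
  induction l with
  | nil =>
    intro best hb _
    refine ⟨fun h => ⟨h, by simp⟩, ?_⟩
    intro t ht
    rcases hb with hb | ⟨t', ht', hv⟩
    · rw [List.foldl_nil] at ht; rw [ht] at hb; cases hb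
    · rw [List.foldl_nil] at ht; rw [ht] at ht'; injection ht' with h; rw [h]; exact hv
  | cons p l ih =>
    intro best hb hm
    have hp := hm p List.mem_cons_self
    have hstep := pbStep_valid b best p hp hb
    obtain ⟨ihn, ihs⟩ := ih (pbStep b best p) hstep
      (fun q hq => hm q (List.mem_cons_of_mem _ hq))
    rw [List.foldl_cons]
    constructor
    · intro hres
      obtain ⟨h1, h2⟩ := ihn hres
      obtain ⟨h3, h4⟩ := pbStep_eq_none b best p h1
      refine ⟨h3, ?_⟩
      intro q hq
      rcases List.mem_cons.1 hq with rfl | hq'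
      · exact h4
      · exact h2 q hq'
    · exact ihs

theorem pickBest_none (b : List (List Int)) (h : pickBest b = none) :
    ∀ i j, i < 9 → j < 9 → cellAt b i j ≠ 0 := by
  rw [pickBest_eq] at h
  obtain ⟨hspec, _⟩ := pbFold_spec b allPositions none (Or.inl rfl)
    (fun p hp => (mem_allPositions p).1 hp)
  intro i j hi hj
  exact (hspec h).2 (i, j) ((mem_allPositions (i, j)).2 ⟨hi, hj⟩)

theorem pickBest_some (b : List (List Int)) (i j : Nat) (cand : List Int)
    (h : pickBest b = some (i, j, cand)) :
    i < 9 ∧ j < 9 ∧ cellAt b i j = 0 ∧ cand = candidatesB b i j := by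
  rw [pickBest_eq] at h
  obtain ⟨_, hspec⟩ := pbFold_spec b allPositions none (Or.inl rfl)
    (fun p hp => (mem_allPositions p).1 hp)
  exact hspec (i, j, cand) h

-- ---- both solvers decide Solvable ----
theorem zeros_pos_of_empty (b : List (List Int)) (r c : Nat) (hr : r < 9) (hc : c < 9)
    (h0 : cellAt b r c = 0) : 0 < zeros b := by
  rw [zeros, List.countP_pos_iff]
  exact ⟨(r, c), (mem_allPositions (r, c)).2 ⟨hr, hc⟩, by simpa using h0⟩

theorem solveAAux_correct (fuel : Nat) :
    ∀ b, Shaped b → zeros b ≤ fuel → (solveAAux fuel b = true ↔ Solvable b) := by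
  induction fuel with
  | zero =>
    intro b hsh hz
    rw [solveAAux]
    cases hfe : find_empty b with
    | none =>
      simp only [true_iff]
      exact Solvable_of_no_empty b ((find_empty_none b).1 hfe)
    | some rc =>
      obtain ⟨r, c⟩ := rc
      obtain ⟨hr, hc, h0⟩ := find_empty_some b r c hfe
      exact absurd (zeros_pos_of_empty b r c hr hc h0) (by omega)
  | succ fuel ih =>
    intro b hsh hz
    rw [solveAAux]
    cases hfe : find_empty b with
    | none =>
      simp only [true_iff]
      exact Solvable_of_no_empty b ((find_empty_none b).1 hfe)
    | some rc =>
      obtain ⟨r, c⟩ := rc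
      obtain ⟨hr, hc, h0⟩ := find_empty_some b r c hfe
      simp only [List.any_eq_true, Bool.and_eq_true]
      rw [step_iff b r c hsh hr hc h0]
      constructor
      · rintro ⟨num, hmem, hsafe, hrec⟩
        rw [PySem.List.mem_pyRange_one] at hmem
        refine ⟨num, hmem.1, by omega, (is_safe_iff b r c num).1 hsafe, ?_⟩
        have hz' : zeros (putAt b r c num) ≤ fuel := by
          have := zeros_putAt_lt b r c num hr hc h0 (by omega) hsh
          omega
        exact (ih (putAt b r c num) (Shaped_putAt b r c num hsh) hz').1 hrec
      · rintro ⟨v, h1, h9, hsafe, hsol⟩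
        refine ⟨v, PySem.List.mem_pyRange_one.2 ⟨h1, by omega⟩,
          (is_safe_iff b r c v).2 hsafe, ?_⟩
        have hz' : zeros (putAt b r c v) ≤ fuel := by
          have := zeros_putAt_lt b r c v hr hc h0 (by omega) hsh
          omega
        exact (ih (putAt b r c v) (Shaped_putAt b r c v hsh) hz').2 hsol

theorem solveBAux_correct (fuel : Nat) :
    ∀ b, Shaped b → zeros b ≤ fuel → (solveBAux fuel b = true ↔ Solvable b) := by
  induction fuel with
  | zero =>
    intro b hsh hz
    rw [solveBAux]
    cases hpk : pickBest b with
    | none =>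
      simp only [true_iff]
      exact Solvable_of_no_empty b (pickBest_none b hpk)
    | some t =>
      obtain ⟨i, j, cand⟩ := t
      obtain ⟨hi, hj, h0, _⟩ := pickBest_some b i j cand hpk
      exact absurd (zeros_pos_of_empty b i j hi hj h0) (by omega)
  | succ fuel ih =>
    intro b hsh hz
    rw [solveBAux]
    cases hpk : pickBest b with
    | none =>
      simp only [true_iff]
      exact Solvable_of_no_empty b (pickBest_none b hpk)
    | some t =>
      obtain ⟨i, j, cand⟩ := t
      obtain ⟨hi, hj, h0, hcand⟩ := pickBest_some b i j cand hpk
      simp only [List.any_eq_true]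
      rw [step_iff b i j hsh hi hj h0]
      constructor
      · rintro ⟨d, hmem, hrec⟩
        rw [hcand, mem_candidatesB b i j hi hj d] at hmem
        obtain ⟨h1, h9, hsafe⟩ := hmem
        refine ⟨d, h1, h9, hsafe, ?_⟩
        have hz' : zeros (putAt b i j d) ≤ fuel := by
          have := zeros_putAt_lt b i j d hi hj h0 (by omega) hsh
          omega
        exact (ih (putAt b i j d) (Shaped_putAt b i j d hsh) hz').1 hrec
      · rintro ⟨v, h1, h9, hsafe, hsol⟩
        refine ⟨v, ?_, ?_⟩
        · rw [hcand, mem_candidatesB b i j hi hj v]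
          exact ⟨h1, h9, hsafe⟩
        · have hz' : zeros (putAt b i j v) ≤ fuel := by
            have := zeros_putAt_lt b i j v hi hj h0 (by omega) hsh
            omega
          exact (ih (putAt b i j v) (Shaped_putAt b i j v hsh) hz').2 hsol

theorem solve_eq (b : List (List Int)) (hsh : Shaped b) : solve_board b = solvableB b := by
  have hA := solveAAux_correct 81 b hsh (zeros_le b)
  have hB := solveBAux_correct 81 b hsh (zeros_le b)
  rw [solve_board, solvableB]
  cases hx : solveAAux 81 b <;> cases hy : solveBAux 81 b <;> simp_all

-- ---- the two outer loops agree ----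
def tailPositions (i j : Nat) : List (Nat × Nat) :=
  if 9 ≤ i then []
  else ((List.range' j (9 - j)).map (fun j' => (i, j'))) ++
       ((List.range' (i + 1) (8 - i)).flatMap (fun i' => (List.range 9).map (fun j' => (i', j'))))

theorem tailPositions_zero : allPositions = tailPositions 0 0 := by
  decide

theorem tailPositions_rollover (i : Nat) (hi : i < 9) :
    tailPositions i 9 = tailPositions (i + 1) 0 := by
  by_cases h8 : i = 8
  · subst h8; decide
  · have h1 : ¬ 9 ≤ i := by omega
    have h2 : ¬ 9 ≤ i + 1 := by omega
    have h3 : 8 - i = (7 - i) + 1 := by omega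
    simp only [tailPositions, if_neg h1, if_neg h2]
    rw [h3, List.range'_succ]
    simp only [Nat.sub_self, List.range'_zero, List.map_nil, List.nil_append,
      List.flatMap_cons, Nat.sub_zero]
    rw [show 8 - (i + 1) = 7 - i from by omega, List.range_eq_range']

theorem tailPositions_cons (i j : Nat) (hi : i < 9) (hj : j < 9) :
    tailPositions i j = (i, j) :: tailPositions i (j + 1) := by
  have h1 : ¬ 9 ≤ i := by omega
  have h3 : 9 - j = (8 - j) + 1 := by omega
  simp only [tailPositions, if_neg h1]
  rw [h3, List.range'_succ]
  simp only [List.map_cons, List.cons_append]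
  rw [show 9 - (j + 1) = 8 - j from by omega]

theorem goA_eq_goB (cutoff : Int) (i j : Nat) (b : List (List Int)) (removed : Int)
    (hi : i ≤ 9) (hj : j ≤ 9) (hpre : cutoff ≤ removed ∨ Shaped b) :
    goA cutoff i j b removed = goB cutoff (tailPositions i j) b removed := by
  revert hi hj hpre
  induction i, j, b, removed using goA.induct cutoff with
  | case1 i j b removed h =>
    intro hi hj hpre
    rw [goA, if_pos h, tailPositions, if_pos h, goB]
  | case2 i j b removed h1 h2 ih =>
    intro hi hj hpre
    have hj9 : j = 9 := by omega
    subst hj9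
    rw [goA, if_neg h1, if_pos h2, tailPositions_rollover i (by omega)]
    exact ih (by omega) (by omega) hpre
  | case3 i j b removed h1 h2 h3 =>
    intro hi hj hpre
    rw [goA, if_neg h1, if_neg h2, if_pos h3,
      tailPositions_cons i j (by omega) (by omega), goB, if_pos h3]
  | case4 i j b removed h1 h2 h3 h4 ih =>
    intro hi hj hpre
    rw [goA, if_neg h1, if_neg h2, if_neg h3, if_pos h4,
      tailPositions_cons i j (by omega) (by omega), goB, if_neg h3, if_pos h4]
    exact ih (by omega) (by omega) hpre
  | case5 i j b removed h1 h2 h3 h4 b' h5 ih =>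
    intro hi hj hpre
    have hb : b' = putAt b i j 0 := rfl
    have hsh : Shaped b := hpre.resolve_left h3
    have hshb : Shaped b' := hb ▸ Shaped_putAt b i j 0 hsh
    rw [goA, if_neg h1, if_neg h2, if_neg h3, if_neg h4,
      tailPositions_cons i j (by omega) (by omega), goB, if_neg h3, if_neg h4]
    show (if solve_board b' then goA cutoff i (j + 1) b' (removed + 1)
          else goA cutoff i (j + 1) b removed) =
        (if solvableB b' then goB cutoff (tailPositions i (j + 1)) b' (removed + 1)
          else goB cutoff (tailPositions i (j + 1)) b removed)
    rw [← solve_eq b' hshb, if_pos h5, if_pos h5]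
    exact ih (by omega) (by omega) (Or.inr hshb)
  | case6 i j b removed h1 h2 h3 h4 b' h5 ih =>
    intro hi hj hpre
    have hb : b' = putAt b i j 0 := rfl
    have hsh : Shaped b := hpre.resolve_left h3
    have hshb : Shaped b' := hb ▸ Shaped_putAt b i j 0 hsh
    rw [goA, if_neg h1, if_neg h2, if_neg h3, if_neg h4,
      tailPositions_cons i j (by omega) (by omega), goB, if_neg h3, if_neg h4]
    show (if solve_board b' then goA cutoff i (j + 1) b' (removed + 1)
          else goA cutoff i (j + 1) b removed) =
        (if solvableB b' then goB cutoff (tailPositions i (j + 1)) b' (removed + 1)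
          else goB cutoff (tailPositions i (j + 1)) b removed)
    rw [← solve_eq b' hshb, if_neg h5, if_neg h5]
    exact ih (by omega) (by omega) (Or.inr hsh)

-- ===== VERDICT (by name: the statement is the Claim_ definition above) =====
theorem remove_numbers_randomly_spec : Claim_equal_remove_numbers_randomly := by
  intro cb cutoff _ hpre
  unfold Spec_remove_numbers_randomly
  unfold remove_numbers_randomly remove_numbers_randomly_alt
  rw [tailPositions_zero]
  exact (goA_eq_goB cutoff 0 0 cb 0 (by omega) (by omega) hpre)
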